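-- pv_equiv track=rewrite | github.com/Diego-de-Souza/service_generate_content | app/ai/seo_optimizer.py | optimize_content_structure
-- ===== SOURCE A (Python) =====
-- from typing import Dict, List, Any, Optional
--
-- def optimize_content_structure(content: str, keywords: List[str]) -> str:
--     """
--     Otimiza estrutura do conteúdo para SEO.
--     """
--     paragraphs = content.split('\n\n')
--     optimized_paragraphs = []
--
--     for i, paragraph in enumerate(paragraphs):
--         # Primeiro parágrafo deve conter keyword principal
--         if i == 0 and keywords:
--             if keywords[0].lower() not in paragraph.lower():
--                 # Tenta inserir naturalmente
--                 words = paragraph.split()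
--                 if len(words) > 10:
--                     insertion_point = len(words) // 3
--                     words.insert(insertion_point, keywords[0])
--                     paragraph = ' '.join(words)
--
--         optimized_paragraphs.append(paragraph)
--
--     # Adiciona subtítulos se não existirem
--     if len(optimized_paragraphs) > 3 and not any('#' in p for p in optimized_paragraphs):
--         # Adiciona subtítulos baseados em keywords
--         for i in range(1, len(optimized_paragraphs), 2):
--             if i < len(keywords) + 1:
--                 subtitle = f"\n## {keywords[i-1].title()}"
--                 optimized_paragraphs.insert(i, subtitle)
--
--     return '\n\n'.join(optimized_paragraphs)
-- ===== SOURCE B (Python) =====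
-- def optimize_content_structure(content, keywords):
--     paragraphs = content.split('\n\n')
--     first = paragraphs[0]
--     if keywords and keywords[0].lower() not in first.lower():
--         words = first.split()
--         if len(words) > 10:
--             words.insert(len(words) // 3, keywords[0])
--             paragraphs[0] = ' '.join(words)
--     n = len(paragraphs)
--     if n > 3 and not any('#' in p for p in paragraphs):
--         out = []
--         for j, p in enumerate(paragraphs):
--             if j >= 1 and 2 * j - 1 < n and 2 * j - 1 <= len(keywords):
--                 out.append('\n## ' + keywords[2 * j - 2].title())
--             out.append(p)
--         paragraphs = out
--     return '\n\n'.join(paragraphs)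
-- ===== Notes on version B (the rewrite author's own statement) =====
-- stated objective: simpler
-- what changed: Phase 2 no longer inserts subtitles into the list it is iterating over a precomputed range (shifting indices); B builds the result in one forward pass, emitting '\n## keyword.title()' immediately before paragraph j when 2j-1 < n and 2j-1 <= len(keywords).
import Mathlib
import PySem

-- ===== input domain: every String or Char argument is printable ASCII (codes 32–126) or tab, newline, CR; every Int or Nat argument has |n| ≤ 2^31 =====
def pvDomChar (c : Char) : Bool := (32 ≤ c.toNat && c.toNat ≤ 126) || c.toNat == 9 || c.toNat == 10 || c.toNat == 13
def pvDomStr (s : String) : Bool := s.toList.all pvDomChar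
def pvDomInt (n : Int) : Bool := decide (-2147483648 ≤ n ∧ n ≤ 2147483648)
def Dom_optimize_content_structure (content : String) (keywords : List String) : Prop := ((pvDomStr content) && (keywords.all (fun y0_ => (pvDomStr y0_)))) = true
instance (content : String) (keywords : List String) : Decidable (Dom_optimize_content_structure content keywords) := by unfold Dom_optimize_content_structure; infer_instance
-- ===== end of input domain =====

-- B replaces A's insert-into-a-shifting-list-while-iterating phase 2 by a single forward
-- pass that emits each subtitle immediately before its paragraph (objective: simpler).

-- ===== PORT A =====
-- str.title() has no PySem primitive: one pass, word boundary = non-alpha char (exact on the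
-- ASCII domain, where the cased characters are exactly the letters)
def pvTitleChars : List Char → Bool → List Char
  | [], _ => []
  | c :: cs, prevAlpha =>
    (if PySem.Chars.isalpha c then
      (if prevAlpha then PySem.Chars.lowerChar c else PySem.Chars.upperChar c)
     else c) :: pvTitleChars cs (PySem.Chars.isalpha c)

-- "\n## " + kw.title()
def pvSubtitle (kw : String) : String :=
  String.ofList ('\n' :: '#' :: '#' :: ' ' :: pvTitleChars kw.toList false)

-- the body of A's "insert keyword into the first paragraph" branch (shared: B performs the
-- identical phase-1 transformation, only its phase 2 differs)
def pvFixFirst (keywords : List String) (paragraph : String) : String :=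
  if !(PySem.Str.isIn (PySem.Str.lower (keywords.headD "")) (PySem.Str.lower paragraph)) then
    let words := PySem.Str.split₀ paragraph
    if words.length > 10 then
      PySem.Str.join " " (PySem.List.insert words
        (PySem.Int.floordiv (words.length : Int) 3) (keywords.headD ""))
    else paragraph
  else paragraph

-- A's loop body for one (i, paragraph) pair
def pvStep (keywords : List String) (ip : Int × String) : String :=
  if ip.1 == 0 && !keywords.isEmpty then pvFixFirst keywords ip.2 else ip.2

def optimize_content_structure (content : String) (keywords : List String) : String :=
  let paragraphs := (PySem.Str.split? content "\n\n").getD []  -- sep "\n\n" ≠ "": split? is never none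
  let optimized := (PySem.List.enumerate paragraphs 0).foldl
      (fun acc ip => acc ++ [pvStep keywords ip]) []
  let optimized :=
    if optimized.length > 3 && !(optimized.any fun p => PySem.Str.isIn "#" p) then
      (PySem.List.pyRange 1 (optimized.length : Int) 2).foldl
        (fun acc i =>
          if i < (keywords.length : Int) + 1 then
            -- keywords[i-1]: the guard puts i-1 in range, so pyGetD is exact here
            PySem.List.insert acc i (pvSubtitle (PySem.List.pyGetD keywords (i - 1) ""))
          else acc)
        optimized
    else optimized
  PySem.Str.join "\n\n" optimized

-- ===== PORT B =====
def optimize_content_structure_alt (content : String) (keywords : List String) : String :=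
  let paragraphs := (PySem.Str.split? content "\n\n").getD []  -- sep "\n\n" ≠ "": split? is never none
  let paragraphs :=
    match paragraphs with
    | [] => ([] : List String)   -- unreachable: str.split('\n\n') never returns an empty list
    | first :: rest =>
      (if !keywords.isEmpty then pvFixFirst keywords first else first) :: rest
  let n : Int := paragraphs.length   -- Python's len() is an int
  let paragraphs :=
    if n > 3 && !(paragraphs.any fun p => PySem.Str.isIn "#" p) then
      (PySem.List.enumerate paragraphs 0).foldl
        (fun out jp =>
          let out := if 1 ≤ jp.1 ∧ 2 * jp.1 - 1 < n ∧ 2 * jp.1 - 1 ≤ (keywords.length : Int)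
            then out ++ [pvSubtitle (PySem.List.pyGetD keywords (2 * jp.1 - 2) "")] else out
          out ++ [jp.2]) []
    else paragraphs
  PySem.Str.join "\n\n" paragraphs

-- ===== PRECONDITION & SPEC =====
def Spec_optimize_content_structure (content : String) (keywords : List String) (out : String) : Prop := out = optimize_content_structure_alt content keywords
instance (content : String) (keywords : List String) (out : String) : Decidable (Spec_optimize_content_structure content keywords out) := by unfold Spec_optimize_content_structure; infer_instance

-- ===== CLAIM (what is proved, stated in full; the proofs are below) =====
def Claim_equal_optimize_content_structure : Prop := ∀ (content : String) (keywords : List String), Dom_optimize_content_structure content keywords → Spec_optimize_content_structure content keywords (optimize_content_structure content keywords)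

-- ===== LEMMAS AND PROOFS =====

-- indices s ≠ 0 never fire A's first-paragraph branch
theorem pvStep_of_ne (keywords : List String) (s : Int) (p : String) (h : s ≠ 0) :
    pvStep keywords (s, p) = p := by
  simp [pvStep, h]

-- phase 1, tail of A's loop: from index 1 on it only copies
theorem pv_phase1_tail (keywords : List String) :
    ∀ (rest : List String) (s : Int) (acc : List String), 1 ≤ s →
      (PySem.List.enumerate rest s).foldl (fun acc ip => acc ++ [pvStep keywords ip]) acc
        = acc ++ rest := by
  intro rest
  induction rest with
  | nil => intro s acc _; simp [PySem.List.enumerate_nil]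
  | cons p t ih =>
    intro s acc hs
    rw [PySem.List.enumerate_cons]
    simp only [List.foldl_cons]
    rw [pvStep_of_ne keywords s p (by omega), ih (s + 1) _ (by omega)]
    simp

-- phase 1 as a whole: A's enumerate loop = B's head-only rewrite
theorem pv_phase1 (keywords : List String) (ps : List String) :
    (PySem.List.enumerate ps 0).foldl (fun acc ip => acc ++ [pvStep keywords ip]) []
      = (match ps with
         | [] => ([] : List String)
         | first :: rest =>
           (if !keywords.isEmpty then pvFixFirst keywords first else first) :: rest) := by
  cases ps with
  | nil => simp [PySem.List.enumerate_nil]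
  | cons first rest =>
    rw [PySem.List.enumerate_cons]
    simp only [List.foldl_cons]
    rw [pv_phase1_tail keywords rest (0 + 1) _ (by omega)]
    have : pvStep keywords (0, first)
        = if !keywords.isEmpty then pvFixFirst keywords first else first := by
      simp [pvStep]
    rw [this]
    simp

-- step-2 range recursion
theorem pv_pyRange_two_nil (a b : Int) (h : b ≤ a) :
    PySem.List.pyRange a b 2 = [] := by
  rw [PySem.List.pyRange_of_pos a b (by norm_num)]
  simp [show ¬ a < b by omega]

theorem pv_pyRange_two_cons (a b : Int) (h : a < b) :
    PySem.List.pyRange a b 2 = a :: PySem.List.pyRange (a + 2) b 2 := by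
  rw [PySem.List.pyRange_of_pos a b (by norm_num),
      PySem.List.pyRange_of_pos (a + 2) b (by norm_num)]
  by_cases h2 : a + 2 < b
  · have : ((b - a + 2 - 1) / 2).toNat = ((b - (a + 2) + 2 - 1) / 2).toNat + 1 := by omega
    rw [if_pos h, if_pos h2, this, List.range_succ_eq_map]
    simp [List.map_map, Function.comp]
    intro k _
    ring
  · have : ((b - a + 2 - 1) / 2).toNat = 1 := by omega
    rw [if_pos h, if_neg h2, this]
    simp

-- once the guard i < len(keywords)+1 has failed, A's remaining iterations do nothing
theorem pv_afold_id (keywords : List String) (a b : Int) (L : List String)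
    (h : (keywords.length : Int) + 1 ≤ a) :
    (PySem.List.pyRange a b 2).foldl
      (fun acc i =>
        if i < (keywords.length : Int) + 1 then
          PySem.List.insert acc i (pvSubtitle (PySem.List.pyGetD keywords (i - 1) ""))
        else acc) L = L := by
  rw [PySem.List.foldl_congr_mem _ _ (fun acc _ => acc)]
  · simp
  · intro acc i hi
    have hm := (PySem.List.mem_pyRange_iff_of_pos (by norm_num) i).mp hi
    rw [if_neg (by omega)]

-- B's emitted block for one (j, paragraph) pair (proof-side abbreviation)
def pvGB (keywords : List String) (n : Int) (jp : Int × String) : List String :=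
  if 1 ≤ jp.1 ∧ 2 * jp.1 - 1 < n ∧ 2 * jp.1 - 1 ≤ (keywords.length : Int)
    then [pvSubtitle (PySem.List.pyGetD keywords (2 * jp.1 - 2) ""), jp.2] else [jp.2]

-- B's loop is the flatMap of pvGB
theorem pv_bfold (keywords : List String) (n : Int) (ps : List String) (s : Int)
    (out0 : List String) :
    (PySem.List.enumerate ps s).foldl
      (fun out jp =>
        let out := if 1 ≤ jp.1 ∧ 2 * jp.1 - 1 < n ∧ 2 * jp.1 - 1 ≤ (keywords.length : Int)
          then out ++ [pvSubtitle (PySem.List.pyGetD keywords (2 * jp.1 - 2) "")] else out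
        out ++ [jp.2]) out0
    = out0 ++ (PySem.List.enumerate ps s).flatMap (pvGB keywords n) := by
  rw [PySem.List.foldl_congr_mem _ _ (fun out jp => out ++ pvGB keywords n jp)]
  · exact PySem.List.foldl_append_eq_flatMap _ _ _
  · intro acc x _
    unfold pvGB
    split_ifs <;> simp

-- once B's guard has failed (it is antitone in j), the rest of the pass copies paragraphs
theorem pv_gb_id (keywords : List String) (n : Int) :
    ∀ (suf : List String) (s : Int),
      ((keywords.length : Int) < 2 * s - 1 ∨ n ≤ 2 * s - 1) →
      (PySem.List.enumerate suf s).flatMap (pvGB keywords n) = suf := by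
  intro suf
  induction suf with
  | nil => intro s _; simp [PySem.List.enumerate_nil]
  | cons p t ih =>
    intro s hs
    rw [PySem.List.enumerate_cons]
    simp only [List.flatMap_cons]
    rw [ih (s + 1) (by omega)]
    have : pvGB keywords n (s, p) = [p] := by
      unfold pvGB; rw [if_neg (by simp; omega)]
    rw [this]; rfl

-- the main induction: A's shifting inserts = B's forward pass, suffix by suffix.
-- Invariant: pre (length 2k-1) is the already interleaved prefix p0,s1,p1,…,s_{k-1},p_{k-1};
-- the next A-iteration inserts at index 2k-1 = |pre|, i.e. right before paragraph k.
theorem pv_phase2_aux (keywords : List String) :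
    ∀ (suf : List String) (k : ℕ) (pre : List String), 1 ≤ k →
      pre.length = 2 * k - 1 →
      (PySem.List.pyRange (2 * (k : Int) - 1) ((k + suf.length : ℕ) : Int) 2).foldl
        (fun acc i =>
          if i < (keywords.length : Int) + 1 then
            PySem.List.insert acc i (pvSubtitle (PySem.List.pyGetD keywords (i - 1) ""))
          else acc) (pre ++ suf)
        = pre ++ (PySem.List.enumerate suf (k : Int)).flatMap
            (pvGB keywords ((k + suf.length : ℕ) : Int)) := by
  intro suf
  induction suf with
  | nil =>
    intro k pre hk hpre
    rw [pv_pyRange_two_nil _ _ (by push_cast [List.length_nil]; omega)]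
    simp [PySem.List.enumerate_nil]
  | cons p t ih =>
    intro k pre hk hpre
    by_cases h1 : (2 * (k : Int) - 1) < ((k + (p :: t).length : ℕ) : Int)
    · rw [pv_pyRange_two_cons _ _ h1]
      simp only [List.foldl_cons]
      by_cases hg : (2 * (k : Int) - 1) < (keywords.length : Int) + 1
      · rw [if_pos hg]
        have hidx : (2 * (k : Int) - 1) = ((pre.length : ℕ) : Int) := by
          push_cast [hpre]; omega
        rw [hidx, PySem.List.insert_natCast _ _ _ (by simp)]
        rw [List.take_left, List.drop_left]
        have hstart : ((pre.length : ℕ) : Int) + 2 = 2 * ((k + 1 : ℕ) : Int) - 1 := by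
          push_cast [hpre]; omega
        have hN : ((k + (p :: t).length : ℕ) : Int) = (((k + 1) + t.length : ℕ) : Int) := by
          push_cast [List.length_cons]; ring
        have hins : pre ++ pvSubtitle (PySem.List.pyGetD keywords (((pre.length : ℕ) : Int) - 1) "") :: p :: t
            = (pre ++ [pvSubtitle (PySem.List.pyGetD keywords (((pre.length : ℕ) : Int) - 1) ""), p]) ++ t := by
          simp
        rw [hstart, hN, hins, ih (k + 1) _ (by omega) (by simp [hpre]; omega)]
        rw [PySem.List.enumerate_cons]
        simp only [List.flatMap_cons]
        have hgb : pvGB keywords (((k + 1) + t.length : ℕ) : Int) ((k : Int), p)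
            = [pvSubtitle (PySem.List.pyGetD keywords (2 * (k : Int) - 2) ""), p] := by
          unfold pvGB
          rw [if_pos ⟨by show (1 : Int) ≤ (k : Int); exact_mod_cast hk,
            by show 2 * (k : Int) - 1 < (((k + 1) + t.length : ℕ) : Int); rw [← hN]; exact h1,
            by show 2 * (k : Int) - 1 ≤ (keywords.length : Int); omega⟩]
        rw [hgb]
        have : ((pre.length : ℕ) : Int) - 1 = 2 * (k : Int) - 2 := by push_cast [hpre]; omega
        rw [this]
        simp
      · rw [if_neg hg]
        rw [pv_afold_id _ _ _ _ (by omega)]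
        rw [pv_gb_id _ _ _ _ (Or.inl (by omega))]
    · rw [pv_pyRange_two_nil _ _ (by omega)]
      simp only [List.foldl_nil]
      rw [pv_gb_id _ _ _ _ (Or.inr (by omega))]

-- ===== VERDICT (by name: the statement is the Claim_ definition above) =====
theorem optimize_content_structure_spec : Claim_equal_optimize_content_structure := by
  unfold Claim_equal_optimize_content_structure Spec_optimize_content_structure
  intro content keywords _
  simp only [optimize_content_structure, optimize_content_structure_alt]
  rw [pv_phase1]
  cases hps : (PySem.Str.split? content "\n\n").getD [] with
  | nil => rfl
  | cons first rest =>
    simp only []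
    set q0 := (if !keywords.isEmpty then pvFixFirst keywords first else first) with hq0
    have hcond : (decide ((((q0 :: rest).length : ℕ) : Int) > 3)
          && !((q0 :: rest).any fun p => PySem.Str.isIn "#" p))
        = (decide ((q0 :: rest).length > 3)
          && !((q0 :: rest).any fun p => PySem.Str.isIn "#" p)) := by
      norm_num
    rw [hcond]
    by_cases hc : (decide ((q0 :: rest).length > 3)
        && !((q0 :: rest).any fun p => PySem.Str.isIn "#" p)) = true
    · rw [if_pos hc, if_pos hc]
      rw [pv_bfold keywords (((q0 :: rest).length : ℕ) : Int) (q0 :: rest) 0 []]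
      rw [PySem.List.enumerate_cons]
      simp only [List.flatMap_cons]
      have h0 : pvGB keywords (((q0 :: rest).length : ℕ) : Int) ((0 : Int), q0) = [q0] := by
        unfold pvGB; rw [if_neg (by simp)]
      rw [h0]
      have e1 : (((q0 :: rest).length : ℕ) : Int) = ((1 + rest.length : ℕ) : Int) := by
        push_cast [List.length_cons]; ring
      have e2 : (1 : Int) = 2 * ((1 : ℕ) : Int) - 1 := by norm_num
      rw [e1, e2]
      have := pv_phase2_aux keywords rest 1 [q0] (by omega) (by simp)
      exact congrArg (PySem.Str.join "\n\n") (by simpa using this)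
    · rw [if_neg hc, if_neg hc]
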